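-- pv_equiv track=rewrite | github.com/tiddlyweb/tiddlyweb-plugins | gzipper/gzipper.py | _remove_header
-- ===== SOURCE A (Python) =====
-- def _remove_header(headers, name):
--     name = name.lower()
--     i = 0
--     result = None
--     while i < len(headers):
--         if headers[i][0].lower() == name:
--             result = headers[i][1]
--             del headers[i]
--             continue
--         i += 1
--     return result
-- ===== SOURCE B (Python) =====
-- def _remove_header(headers, name):
--     n = name.lower()
--     result = None
--     kept = []
--     for k, v in headers:
--         if k.lower() == n:
--             result = v
--         else:
--             kept.append((k, v))
--     headers[:] = kept
--     return result
-- ===== Notes on version B (the rewrite author's own statement) =====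
-- stated objective: simpler
-- what changed: Replaced the while-loop with index bookkeeping and repeated del by a single forward pass that collects non-matching entries and remembers the last matching value, then replaces the list contents in place with headers[:] = kept.
import Mathlib
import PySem

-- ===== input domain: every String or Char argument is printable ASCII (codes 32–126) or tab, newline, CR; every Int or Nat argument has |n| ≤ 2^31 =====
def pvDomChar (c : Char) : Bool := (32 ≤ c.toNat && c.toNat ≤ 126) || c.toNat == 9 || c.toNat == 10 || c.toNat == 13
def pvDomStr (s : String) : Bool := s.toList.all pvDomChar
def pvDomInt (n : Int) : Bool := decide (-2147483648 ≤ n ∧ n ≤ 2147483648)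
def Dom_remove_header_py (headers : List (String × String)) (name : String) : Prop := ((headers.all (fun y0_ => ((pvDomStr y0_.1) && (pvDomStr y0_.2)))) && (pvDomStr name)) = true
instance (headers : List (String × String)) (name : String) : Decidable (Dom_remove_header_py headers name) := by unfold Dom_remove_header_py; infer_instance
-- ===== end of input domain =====

-- B replaces A's index-and-del while loop by a single filtering pass (last match wins);
-- both A and B mutate the caller's list identically, the equivalence proved here is about the return value.
-- ===== PORT A =====
def remove_header_py_loop (headers : List (String × String)) (name : String)
    (i : Nat) (result : Option String) : Option String :=
  if h : i < headers.length then
    if PySem.Str.lower (headers[i]).1 == name then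
      remove_header_py_loop (headers.eraseIdx i) name i (some (headers[i]).2)
    else
      remove_header_py_loop headers name (i + 1) result
  else
    result
termination_by headers.length - i
decreasing_by
  · simp [List.length_eraseIdx, h]; omega
  · omega

def remove_header_py (headers : List (String × String)) (name : String) : Option String :=
  remove_header_py_loop headers (PySem.Str.lower name) 0 none

-- ===== PORT B =====
def remove_header_py_alt (headers : List (String × String)) (name : String) : Option String :=
  let n := PySem.Str.lower name
  (headers.foldl
    (fun st kv =>
      if PySem.Str.lower kv.1 == n then (st.1, some kv.2) else (st.1 ++ [kv], st.2))
    (([] : List (String × String)), (none : Option String))).2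

-- ===== PRECONDITION & SPEC =====
def Spec_remove_header_py (headers : List (String × String)) (name : String) (out : Option String) : Prop := out = remove_header_py_alt headers name
instance (headers : List (String × String)) (name : String) (out : Option String) : Decidable (Spec_remove_header_py headers name out) := by unfold Spec_remove_header_py; infer_instance

-- ===== CLAIM (what is proved, stated in full; the proofs are below) =====
def Claim_equal_remove_header_py : Prop := ∀ (headers : List (String × String)) (name : String), Dom_remove_header_py headers name → Spec_remove_header_py headers name (remove_header_py headers name)

-- ===== LEMMAS AND PROOFS =====

-- the foldl's second component ignores the kept-list component
theorem alt_snd (hs : List (String × String)) (n : String)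
    (k : List (String × String)) (r : Option String) :
    (hs.foldl
      (fun st kv =>
        if PySem.Str.lower kv.1 == n then (st.1, some kv.2) else (st.1 ++ [kv], st.2))
      (k, r)).2
    = hs.foldl (fun acc kv => if PySem.Str.lower kv.1 == n then some kv.2 else acc) r := by
  induction hs generalizing k r with
  | nil => rfl
  | cons hd tl ih =>
    simp only [List.foldl]
    by_cases hm : (PySem.Str.lower hd.1 == n) = true
    · rw [if_pos hm, if_pos hm, ih]
    · rw [if_neg hm, if_neg hm, ih]

theorem drop_eraseIdx_self {α : Type} (l : List α) (i : Nat) (h : i < l.length) :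
    (l.eraseIdx i).drop i = l.drop (i + 1) := by
  have hd := List.drop_left (l₁ := l.take i) (l₂ := l.drop (i + 1))
  rw [List.length_take_of_le (Nat.le_of_lt h)] at hd
  rw [List.eraseIdx_eq_take_drop_succ, hd]

-- A's loop from index i computes the same fold over the suffix drop i
theorem loop_eq_foldl (hs : List (String × String)) (n : String) (i : Nat) (r : Option String) :
    remove_header_py_loop hs n i r
    = (hs.drop i).foldl (fun acc kv => if PySem.Str.lower kv.1 == n then some kv.2 else acc) r := by
  induction hs, i, r using remove_header_py_loop.induct (name := n) with
  | case1 hs i r h hm ih =>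
    rw [remove_header_py_loop]
    simp only [h, dif_pos, hm, if_pos]
    rw [ih, drop_eraseIdx_self hs i h, List.drop_eq_getElem_cons h, List.foldl_cons, if_pos hm]
  | case2 hs i r h hm ih =>
    rw [remove_header_py_loop]
    simp only [h, dif_pos]
    rw [if_neg hm, ih, List.drop_eq_getElem_cons h, List.foldl_cons, if_neg hm]
  | case3 hs i r h =>
    rw [remove_header_py_loop, dif_neg h, List.drop_eq_nil_of_le (Nat.le_of_not_lt h), List.foldl_nil]

-- ===== VERDICT =====
theorem remove_header_py_spec : Claim_equal_remove_header_py := by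
  intro headers name _
  unfold Spec_remove_header_py remove_header_py remove_header_py_alt
  rw [loop_eq_foldl, List.drop_zero, alt_snd]
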